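-- pv_equiv track=rewrite | github.com/mcrowls/NFL-Data-Bowl | delaunay_triangulations.py | finding_five_yard
-- ===== SOURCE A (Python) =====
-- def finding_five_yard(array):
--     if len(array) == 1:
--         return array
--     starting_point = array[0]
--     relevant_points = [array[0]]
--     i = 1
--     truth = False
--     while truth == False:
--         if abs(array[i][0] - starting_point[0]) < 5:
--             relevant_points.append(array[i])
--         else:
--             relevant_points.append(array[i])
--             truth = True
--         i += 1
--         #If the path is less than 5 yards in total, need to stop
--         if i == len(array):
--             truth = True
--     return relevant_points
-- ===== SOURCE B (Python) =====
-- def _upto_far(rest, x0):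
--     # prefix of rest up to and including the first point whose x-distance from x0 is >= 5
--     if not rest:
--         return []
--     p = rest[0]
--     if abs(p[0] - x0) >= 5:
--         return [p]
--     return [p] + _upto_far(rest[1:], x0)
--
-- def finding_five_yard(array):
--     if len(array) == 1:
--         return array
--     head = array[0]
--     return [head] + _upto_far(array[1:], head[0])
-- ===== Notes on version B (the rewrite author's own statement) =====
-- stated objective: alternative
-- what changed: Replaces A's index-based while loop with a truth flag and append-accumulator by a structural recursion over the tail list that builds the answer front-to-back with no indices or flags.
import Mathlib
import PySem

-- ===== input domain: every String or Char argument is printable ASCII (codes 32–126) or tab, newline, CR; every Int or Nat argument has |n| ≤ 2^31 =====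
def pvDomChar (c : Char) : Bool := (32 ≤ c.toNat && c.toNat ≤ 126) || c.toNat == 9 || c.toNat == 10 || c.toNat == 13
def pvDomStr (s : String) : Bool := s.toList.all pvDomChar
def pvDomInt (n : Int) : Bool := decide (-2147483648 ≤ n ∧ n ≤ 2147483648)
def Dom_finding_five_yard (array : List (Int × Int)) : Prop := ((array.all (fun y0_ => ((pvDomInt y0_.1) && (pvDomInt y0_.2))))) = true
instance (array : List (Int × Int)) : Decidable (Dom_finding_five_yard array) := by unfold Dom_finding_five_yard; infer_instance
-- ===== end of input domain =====

-- B replaces A's index-based while loop with truth flag and append-accumulator by a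
-- structural recursion over the tail list (objective: alternative, same cost).
-- Both programs raise IndexError on the empty list (array[0]); Pre_ excludes exactly that input.

-- ===== PORT A =====
-- the while loop of A: state = (relevant_points, i); the 'truth' flag is folded into the
-- recursion condition (truth stays False only when |Δx| < 5 and i+1 ≠ len, exactly as in A)
def fiveA_loop (array : List (Int × Int)) (sp : Int × Int)
    (rel : List (Int × Int)) (i : Nat) : List (Int × Int) :=
  if h : i < array.length then    -- array[i] exists; the guard only totalises (the loop stops at i = len)
    let p := array[i]
    let rel' := rel ++ [p]
    if |p.1 - sp.1| < 5 ∧ i + 1 ≠ array.length then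
      fiveA_loop array sp rel' (i + 1)
    else rel'
  else rel
termination_by array.length - i

def finding_five_yard (array : List (Int × Int)) : List (Int × Int) :=
  if array.length == 1 then array
  else
    match array[0]? with
    | none => []   -- Python raises IndexError here; excluded by Pre_
    | some sp => fiveA_loop array sp [sp] 1

-- ===== PORT B =====
-- B's helper _upto_far: prefix of rest up to and including the first far point
def fiveB_uptoFar (rest : List (Int × Int)) (x0 : Int) : List (Int × Int) :=
  match rest with
  | [] => []
  | p :: more =>
    if 5 ≤ |p.1 - x0| then [p]
    else p :: fiveB_uptoFar more x0

def finding_five_yard_alt (array : List (Int × Int)) : List (Int × Int) :=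
  if array.length == 1 then array
  else
    match array with
    | [] => []   -- Python raises IndexError at array[0] here; excluded by Pre_
    | head :: tail => head :: fiveB_uptoFar tail head.1

-- ===== PRECONDITION & SPEC =====
-- Pre_ excludes only the empty list, on which A (and B) raise IndexError at array[0].
def Pre_finding_five_yard (array : List (Int × Int)) : Prop := array ≠ []
instance (array : List (Int × Int)) : Decidable (Pre_finding_five_yard array) := by
  unfold Pre_finding_five_yard; infer_instance

def pvWitness_finding_five_yard : (List (Int × Int)) := [(0, 0), (3, 1), (9, 2)]

def Spec_finding_five_yard (array : List (Int × Int)) (out : List (Int × Int)) : Prop := out = finding_five_yard_alt array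
instance (array : List (Int × Int)) (out : List (Int × Int)) : Decidable (Spec_finding_five_yard array out) := by unfold Spec_finding_five_yard; infer_instance

-- ===== CLAIM (what is proved, stated in full; the proofs are below) =====
def Claim_equal_finding_five_yard : Prop := ∀ (array : List (Int × Int)), Dom_finding_five_yard array → Pre_finding_five_yard array → Spec_finding_five_yard array (finding_five_yard array)

-- ===== LEMMAS AND PROOFS =====

-- loop/recursion bridge: A's indexed loop from position i equals rel ++ B's structural
-- recursion over the dropped suffix
theorem fiveA_loop_eq_uptoFar (array : List (Int × Int)) (sp : Int × Int) :
    ∀ i, i < array.length → ∀ rel,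
      fiveA_loop array sp rel i = rel ++ fiveB_uptoFar (array.drop i) sp.1 := by
  intro i hi
  induction hn : array.length - i using Nat.strong_induction_on generalizing i with
  | _ n ih =>
    subst hn
    intro rel
    rw [fiveA_loop]
    simp only [dif_pos hi]
    have hdrop : array.drop i = array[i] :: array.drop (i + 1) :=
      List.drop_eq_getElem_cons hi
    rw [hdrop, fiveB_uptoFar]
    by_cases habs : |(array[i]).1 - sp.1| < 5
    · have hb : ¬ (5 ≤ |(array[i]).1 - sp.1|) := by omega
      rw [if_neg hb]
      by_cases hend : i + 1 = array.length
      · rw [if_neg (by simp [hend])]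
        have : array.drop (i + 1) = [] := by rw [hend, List.drop_length]
        simp [this, fiveB_uptoFar]
      · rw [if_pos ⟨habs, hend⟩]
        rw [ih (array.length - (i+1)) (by omega) (i+1) (by omega) rfl]
        simp
    · have hb : 5 ≤ |(array[i]).1 - sp.1| := by omega
      rw [if_pos hb, if_neg (by simp [habs])]

-- ===== VERDICT (by name: the statement is the Claim_ definition above) =====
theorem finding_five_yard_spec : Claim_equal_finding_five_yard := by
  intro array _ hpre
  unfold Spec_finding_five_yard finding_five_yard finding_five_yard_alt
  by_cases h1 : array.length == 1
  · simp [h1]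
  · simp only [h1, Bool.false_eq_true, if_false]
    match array, hpre with
    | head :: tail, _ =>
      have hlen : 1 < (head :: tail).length := by
        have : (head :: tail).length ≠ 1 := by simpa using h1
        simp only [List.length_cons] at *
        omega
      show fiveA_loop (head :: tail) head [head] 1 = head :: fiveB_uptoFar tail head.1
      rw [fiveA_loop_eq_uptoFar (head :: tail) head 1 hlen [head]]
      simp
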